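-- pv_equiv track=rewrite | github.com/facelessuser/Rummage | rummage/rummage/gui/export_csv.py | csv_encode
-- ===== SOURCE A (Python) =====
-- def csv_encode(text):
--     """Format text for CSV."""
--
--     encode_table = {
--         '"': '""',
--         '\n': '',
--         '\r': ''
--     }
--
--     return '"%s"' % ''.join(
--         encode_table.get(c, c) for c in text
--     )
-- ===== SOURCE B (Python) =====
-- def csv_encode(text):
--     """Format text for CSV."""
--     return '"%s"' % text.replace('"', '""').replace('\n', '').replace('\r', '')
-- ===== Notes on version B (the rewrite author's own statement) =====
-- stated objective: idiomatic
-- what changed: Replaced the per-character generator with a dict lookup table by a chain of three str.replace scans (escape quotes, drop \n, drop \r) before wrapping in quotes.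
import Mathlib
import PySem

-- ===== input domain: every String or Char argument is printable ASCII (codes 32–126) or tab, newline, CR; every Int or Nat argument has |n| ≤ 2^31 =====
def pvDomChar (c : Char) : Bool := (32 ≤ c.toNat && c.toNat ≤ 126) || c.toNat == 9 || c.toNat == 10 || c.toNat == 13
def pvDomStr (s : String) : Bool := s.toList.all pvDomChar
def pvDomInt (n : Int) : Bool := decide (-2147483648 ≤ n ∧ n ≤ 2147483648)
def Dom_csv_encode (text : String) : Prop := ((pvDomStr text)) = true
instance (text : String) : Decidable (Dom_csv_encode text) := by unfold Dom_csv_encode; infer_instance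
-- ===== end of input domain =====

-- B replaces A's per-character dict-lookup join by a chain of three str.replace scans; objective: idiomatic.

-- ===== PORT A =====
-- the dict literal `encode_table` of A
def csvEncodeTable : PySem.Dict String String :=
  PySem.Dict.ofList [("\"", "\"\""), ("\n", ""), ("\r", "")]

def csv_encode (text : String) : String :=
  "\"" ++ PySem.Str.join ""
    (text.toList.map (fun c =>
      (csvEncodeTable.get? (String.singleton c)).getD (String.singleton c))) ++ "\""

-- ===== PORT B =====
def csv_encode_alt (text : String) : String :=
  "\"" ++ PySem.Str.replace (PySem.Str.replace (PySem.Str.replace text "\"" "\"\"") "\n" "") "\r" "" ++ "\""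

-- ===== PRECONDITION & SPEC =====
def Spec_csv_encode (text : String) (out : String) : Prop := out = csv_encode_alt text
instance (text : String) (out : String) : Decidable (Spec_csv_encode text out) := by unfold Spec_csv_encode; infer_instance

-- ===== CLAIM (what is proved, stated in full; the proofs are below) =====
def Claim_equal_csv_encode : Prop := ∀ (text : String), Dom_csv_encode text → Spec_csv_encode text (csv_encode text)

-- ===== LEMMAS AND PROOFS =====

-- replace with a single-character pattern is a per-character flatMap
theorem replace_go_single (a : Char) (new : List Char) :
    ∀ (l : List Char) (fuel : Nat) (acc : List Char), l.length ≤ fuel →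
      PySem.Chars.replace.go [a] new fuel l acc
        = acc.reverse ++ l.flatMap (fun c => if c = a then new else [c]) := by
  intro l
  induction l with
  | nil =>
    intro fuel acc _
    cases fuel <;> simp [PySem.Chars.replace.go]
  | cons c t ih =>
    intro fuel acc hfuel
    cases fuel with
    | zero => simp at hfuel
    | succ k =>
      by_cases hc : c = a
      · have hpre : List.isPrefixOf [a] (c :: t) = true := by simp [List.isPrefixOf, hc]
        have ht : t.length ≤ k := by simpa using hfuel
        rw [PySem.Chars.replace.go, if_pos hpre]
        simp only [List.length_cons, List.length_nil, Nat.zero_add, List.drop_succ_cons,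
          List.drop_zero]
        rw [ih k (new.reverse ++ acc) ht]
        simp [hc]
      · have hpre : List.isPrefixOf [a] (c :: t) = false := by
          simp [List.isPrefixOf]
          intro h; exact hc h.symm
        rw [PySem.Chars.replace.go, if_neg (by simp [hpre])]
        rw [ih k (c :: acc) (by simpa using hfuel)]
        simp [hc]

theorem replace_single (a : Char) (new cs : List Char) :
    PySem.Chars.replace cs [a] new = cs.flatMap (fun c => if c = a then new else [c]) := by
  rw [PySem.Chars.replace, if_neg (by simp)]
  exact replace_go_single a new cs cs.length [] (le_refl _)

theorem join_empty_flatten (xs : List (List Char)) :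
    PySem.Chars.join [] xs = xs.flatten := by
  show ([] : List Char).intercalate xs = xs.flatten
  induction xs with
  | nil => rfl
  | cons x xs ih =>
    cases xs with
    | nil => simp [List.intercalate]
    | cons y ys => simp_all [List.intercalate, List.intersperse]

-- middle strings agree, character list by character list
theorem csv_middle (cs : List Char) :
    PySem.Chars.join []
      ((cs.map (fun c =>
        (csvEncodeTable.get? (String.singleton c)).getD (String.singleton c))).map String.toList)
      = ((cs.flatMap (fun c => if c = '"' then ['"', '"'] else [c])).flatMap
          (fun c => if c = '\n' then [] else [c])).flatMap
          (fun c => if c = '\r' then [] else [c]) := by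
  induction cs with
  | nil => simp [PySem.Chars.join_nil]
  | cons c t ih =>
    simp only [List.map_cons, List.flatMap_cons, List.flatMap_append]
    rw [join_empty_flatten] at ih ⊢
    simp only [List.flatten_cons]
    rw [ih]
    congr 1
    have hsing : ∀ a : Char, (String.singleton c = String.singleton a) ↔ c = a := by
      intro a
      constructor
      · intro h; have := congrArg String.toList h; simpa using this
      · intro h; rw [h]
    by_cases h1 : c = '"'
    · subst h1; rfl
    · by_cases h2 : c = '\n'
      · subst h2; rfl
      · by_cases h3 : c = '\r'
        · subst h3; rfl
        · have e1 : (String.singleton c == "\"") = false := by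
            simp only [beq_eq_false_iff_ne, ne_eq]
            exact fun h => h1 ((hsing '"').mp h)
          have e2 : (String.singleton c == "\n") = false := by
            simp only [beq_eq_false_iff_ne, ne_eq]
            exact fun h => h2 ((hsing '\n').mp h)
          have e3 : (String.singleton c == "\r") = false := by
            simp only [beq_eq_false_iff_ne, ne_eq]
            exact fun h => h3 ((hsing '\r').mp h)
          simp [csvEncodeTable, PySem.Dict.ofList, PySem.Dict.update, PySem.Dict.insert,
            PySem.Dict.empty, PySem.Dict.get?, PySem.Dict.contains,
            BEq.symm_false e1, BEq.symm_false e2, BEq.symm_false e3, h1, h2, h3]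

-- ===== VERDICT (by name: the statement is the Claim_ definition above) =====
theorem csv_encode_spec : Claim_equal_csv_encode := by
  intro text _
  unfold Spec_csv_encode csv_encode csv_encode_alt
  apply String.toList_inj.mp
  simp only [String.toList_append, PySem.Str.toList_join, PySem.Str.toList_replace]
  have l0 : ("" : String).toList = ([] : List Char) := rfl
  have l1 : ("\"" : String).toList = (['"'] : List Char) := rfl
  have l2 : ("\"\"" : String).toList = (['"', '"'] : List Char) := rfl
  have l3 : ("\n" : String).toList = (['\n'] : List Char) := rfl
  have l4 : ("\x0d" : String).toList = (['\r'] : List Char) := rfl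
  rw [l0, l1, l2, l3, l4, csv_middle]
  simp only [replace_single]
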